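-- pv_equiv track=rewrite | github.com/efim1222/prepareEGE | 5-zadanie EGE/Домашнее задание/3.py | F
-- ===== SOURCE A (Python) =====
-- def F(n):
--     n2 = bin(n)[2:]
--     n2m = []
--     for x in n2:
--         n2m.append(int(x))
--     n2s = sum(n2m)
--     n2 = n2 + str(n2s % 2)
--
--     n2m2 = []
--     for y in n2:
--         n2m2.append(int(y))
--     n2s2 = sum(n2m2)
--     n2 = n2 + str(n2s2 % 2)
--
--     return int(n2, 2)
-- ===== SOURCE B (Python) =====
-- def F(n):
--     # one parity pass over the bits; the second parity bit A appends is always 0,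
--     # so the result is the closed form (n*2 + p)*2
--     p = sum(int(x) for x in bin(n)[2:]) % 2
--     return (n * 2 + p) * 2
-- ===== Notes on version B (the rewrite author's own statement) =====
-- stated objective: simpler
-- what changed: Replaces A's string round-trip (bin, two digit-summing loops, re-append, int(...,2)) by one parity pass over the bits and the closed form (n*2 + p)*2, using that the second parity bit A appends is always 0.
import Mathlib
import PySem

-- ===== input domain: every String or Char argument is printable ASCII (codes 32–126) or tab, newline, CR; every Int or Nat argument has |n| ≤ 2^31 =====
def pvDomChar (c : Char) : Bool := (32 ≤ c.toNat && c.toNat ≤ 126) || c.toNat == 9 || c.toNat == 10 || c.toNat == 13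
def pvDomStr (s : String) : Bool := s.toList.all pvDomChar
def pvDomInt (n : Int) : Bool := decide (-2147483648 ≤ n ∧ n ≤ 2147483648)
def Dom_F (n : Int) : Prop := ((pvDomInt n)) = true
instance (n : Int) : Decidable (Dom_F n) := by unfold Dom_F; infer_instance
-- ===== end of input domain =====

-- B replaces A's string round-trip (two digit-summing loops, re-append, int(...,2)) by one
-- parity pass over the bits and the closed form (n*2 + p)*2 (the second parity bit is always 0).

-- ===== PORT A =====
-- int(n2, 2) ported by hand as the base-2 Horner value of the digit characters;
-- exact at its call site: n2 there is a nonempty string of '0'/'1' characters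
-- (no sign, whitespace, underscore or 0b-prefix), on which int(n2, 2) computes exactly this.
def intBase2 (s : List Char) : Int :=
  s.foldl (fun a c => a * 2 + (if c = '1' then 1 else 0)) 0

def F (n : Int) : Int :=
  let n2 : List Char := PySem.List.slice (PySem.Int.toBinChars0b n) (some 2) none
  let n2m : List Int := n2.foldl (fun acc x => acc ++ [(PySem.Int.ofChars? [x]).getD 0]) []
  let n2s : Int := n2m.sum
  let n2b : List Char := n2 ++ PySem.Int.toChars (PySem.Int.mod n2s 2)
  let n2m2 : List Int := n2b.foldl (fun acc y => acc ++ [(PySem.Int.ofChars? [y]).getD 0]) []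
  let n2s2 : Int := n2m2.sum
  let n2c : List Char := n2b ++ PySem.Int.toChars (PySem.Int.mod n2s2 2)
  intBase2 n2c

-- ===== PORT B =====
def F_alt (n : Int) : Int :=
  let bits : List Char := PySem.List.slice (PySem.Int.toBinChars0b n) (some 2) none
  let p : Int := PySem.Int.mod ((bits.map (fun x => (PySem.Int.ofChars? [x]).getD 0)).sum) 2
  (n * 2 + p) * 2

-- ===== PRECONDITION & SPEC =====
-- Pre_ excludes n < 0: there A raises ValueError (int('b') on a digit of bin(n)[2:]), and B raises the same way.
def Pre_F (n : Int) : Prop := 0 ≤ n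
instance (n : Int) : Decidable (Pre_F n) := by unfold Pre_F; infer_instance
def pvWitness_F : Int := 5

def Spec_F (n : Int) (out : Int) : Prop := out = F_alt n
instance (n : Int) (out : Int) : Decidable (Spec_F n out) := by unfold Spec_F; infer_instance

-- ===== CLAIM =====
def Claim_equal_F : Prop := ∀ (n : Int), Dom_F n → Pre_F n → Spec_F n (F n)

-- ===== LEMMAS AND PROOFS =====

/-- the binary digits of n, most significant first (what `Nat.toDigits 2` produces) -/
def myBits (n : Nat) : List Char :=
  if _h : n < 2 then [n.digitChar] else myBits (n / 2) ++ [(n % 2).digitChar]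
  decreasing_by exact Nat.div_lt_self (by omega) (by omega)

theorem toDigitsCore_eq : ∀ (fuel n : Nat), n < fuel → ∀ (acc : List Char),
    Nat.toDigitsCore 2 fuel n acc = myBits n ++ acc := by
  intro fuel
  induction fuel with
  | zero => intro n h; omega
  | succ f ih =>
    intro n h acc
    by_cases h2 : n < 2
    · rw [Nat.toDigitsCore]
      have hz : n / 2 = 0 := by omega
      rw [if_pos hz]
      rw [myBits, dif_pos h2]
      have hm : n % 2 = n := by omega
      rw [hm]
      rfl
    · rw [Nat.toDigitsCore]
      have hnz : ¬ n / 2 = 0 := by omega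
      rw [if_neg hnz]
      rw [ih (n / 2) (by omega) _]
      conv_rhs => rw [myBits]
      rw [dif_neg h2]
      simp

theorem toDigits_eq_myBits (m : Nat) : Nat.toDigits 2 m = myBits m := by
  rw [Nat.toDigits, toDigitsCore_eq (m + 1) m (by omega) [], List.append_nil]

theorem mem_myBits (n : Nat) : ∀ c ∈ myBits n, c = '0' ∨ c = '1' := by
  induction n using Nat.strong_induction_on with
  | _ n ih =>
    by_cases h2 : n < 2
    · rw [myBits, dif_pos h2]
      intro c hc
      simp at hc
      subst hc
      have : n = 0 ∨ n = 1 := by omega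
      rcases this with rfl | rfl
      · exact Or.inl rfl
      · exact Or.inr rfl
    · rw [myBits, dif_neg h2]
      intro c hc
      rcases List.mem_append.mp hc with hc | hc
      · exact ih (n / 2) (Nat.div_lt_self (by omega) (by omega)) c hc
      · simp at hc
        subst hc
        rcases Nat.mod_two_eq_zero_or_one n with h01 | h01 <;> rw [h01]
        · exact Or.inl rfl
        · exact Or.inr rfl

theorem bitsVal_myBits (n : Nat) :
    (myBits n).foldl (fun a c => a * 2 + (if c = '1' then 1 else 0)) (0 : Int) = (n : Int) := by
  induction n using Nat.strong_induction_on with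
  | _ n ih =>
    by_cases h2 : n < 2
    · rw [myBits, dif_pos h2]
      have : n = 0 ∨ n = 1 := by omega
      rcases this with rfl | rfl <;> decide
    · rw [myBits, dif_neg h2]
      rw [List.foldl_append, ih (n / 2) (Nat.div_lt_self (by omega) (by omega))]
      have hdm := Nat.div_add_mod n 2
      rcases Nat.mod_two_eq_zero_or_one n with h01 | h01 <;>
        (rw [h01]; simp [Nat.digitChar]; omega)

theorem sum_bits (n : Nat) :
    ((myBits n).map (fun c => if c = '1' then (1 : Int) else 0)).sum
      = ((PySem.Int.bitCount (n : Int) : Nat) : Int) := by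
  induction n using Nat.strong_induction_on with
  | _ n ih =>
    by_cases h2 : n < 2
    · rw [myBits, dif_pos h2]
      have : n = 0 ∨ n = 1 := by omega
      rcases this with rfl | rfl <;> decide
    · rw [myBits, dif_neg h2]
      rw [List.map_append, List.sum_append, ih (n / 2) (Nat.div_lt_self (by omega) (by omega))]
      rw [PySem.Int.bitCount_natCast (show 0 < n by omega)]
      rcases Nat.mod_two_eq_zero_or_one n with h01 | h01 <;>
        (rw [h01]; simp [Nat.digitChar]; try omega)

theorem map_int_bits (l : List Char) (h : ∀ c ∈ l, c = '0' ∨ c = '1') :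
    l.map (fun x => (PySem.Int.ofChars? [x]).getD 0)
      = l.map (fun c => if c = '1' then (1 : Int) else 0) := by
  apply List.map_congr_left
  intro c hc
  rcases h c hc with rfl | rfl <;> decide

theorem mod_two_natCast (k : Nat) : PySem.Int.mod (k : Int) 2 = ((k % 2 : Nat) : Int) := by
  have h := PySem.Int.mod_natCast k 2
  exact_mod_cast h

theorem toBin0b_nat (m : Nat) : PySem.Int.toBinChars0b (m : Int) = '0' :: 'b' :: Nat.toDigits 2 m := by
  simp only [PySem.Int.toBinChars0b]
  rw [if_neg (by omega)]
  simp

theorem slice2 (L : List Char) : PySem.List.slice ('0' :: 'b' :: L) (some 2) none = L := by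
  rw [show (2 : Int) = ((2 : Nat) : Int) from rfl, PySem.List.slice_from_natCast]
  rfl

theorem F_alt_nat (m : Nat) :
    F_alt (m : Int) = ((m : Int) * 2 + ((PySem.Int.bitCount (m : Int) % 2 : Nat) : Int)) * 2 := by
  simp only [F_alt, toBin0b_nat, slice2, toDigits_eq_myBits]
  rw [map_int_bits _ (mem_myBits m), sum_bits m, mod_two_natCast]

theorem F_nat (m : Nat) : F (m : Int) = F_alt (m : Int) := by
  have hbits := mem_myBits m
  rw [F_alt_nat]
  simp only [F, toBin0b_nat, slice2, toDigits_eq_myBits,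
    PySem.List.foldl_append_singleton_eq_map, List.nil_append]
  rw [map_int_bits _ hbits, sum_bits m, mod_two_natCast]
  rcases Nat.mod_two_eq_zero_or_one (PySem.Int.bitCount (m : Int)) with h01 | h01 <;> rw [h01]
  · rw [show PySem.Int.toChars ((0 : Nat) : Int) = ['0'] from by decide]
    rw [List.map_append, map_int_bits _ hbits,
      show List.map (fun x => (PySem.Int.ofChars? [x]).getD 0) ['0'] = [(0 : Int)] from by decide]
    rw [List.sum_append, sum_bits m]
    rw [show ([(0:Int)].sum) = (0:Int) from by decide]
    rw [show ((PySem.Int.bitCount (m:Int) : Nat) : Int) + 0 = ((PySem.Int.bitCount (m:Int) : Nat) : Int) from by ring]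
    rw [mod_two_natCast, h01]
    rw [show PySem.Int.toChars ((0 : Nat) : Int) = ['0'] from by decide]
    simp only [intBase2, List.foldl_append, bitsVal_myBits]
    simp only [List.foldl_cons, List.foldl_nil,
      if_neg (show ¬ (('0':Char) = '1') from by decide)]
    push_cast
    ring
  · rw [show PySem.Int.toChars ((1 : Nat) : Int) = ['1'] from by decide]
    rw [List.map_append, map_int_bits _ hbits,
      show List.map (fun x => (PySem.Int.ofChars? [x]).getD 0) ['1'] = [(1 : Int)] from by decide]
    rw [List.sum_append, sum_bits m]
    rw [show ([(1:Int)].sum) = (1:Int) from by decide]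
    rw [show ((PySem.Int.bitCount (m:Int) : Nat) : Int) + 1 = (((PySem.Int.bitCount (m:Int) + 1 : Nat)) : Int) from by push_cast; ring]
    rw [mod_two_natCast]
    rw [show (PySem.Int.bitCount (m:Int) + 1) % 2 = 0 from by omega]
    rw [show PySem.Int.toChars ((0 : Nat) : Int) = ['0'] from by decide]
    simp only [intBase2, List.foldl_append, bitsVal_myBits]
    simp only [List.foldl_cons, List.foldl_nil,
      if_neg (show ¬ (('0':Char) = '1') from by decide)]
    push_cast
    ring

-- ===== VERDICT =====
theorem F_spec : Claim_equal_F := by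
  intro n _ hpre
  obtain ⟨m, rfl⟩ : ∃ m : Nat, n = (m : Int) := ⟨n.toNat, (Int.toNat_of_nonneg hpre).symm⟩
  show F _ = F_alt _
  exact F_nat m
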